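-- pv_equiv track=rewrite | github.com/rahmatnazali/receiptreader | receipts/receiptreader/lib/function_general.py | get_header_receipt
-- ===== SOURCE A (Python) =====
-- def get_header_receipt(string):
--     first_index = None
--     second_index = None
--     for index, line in enumerate(string.split('\n')):
--         if '*' in line:
--             if first_index is None: first_index = index
--             elif index - 1 == first_index: continue
--             elif second_index is None: second_index = index
--             else: break
--     return string.split('\n')[first_index:second_index+1]
-- ===== SOURCE B (Python) =====
-- def get_header_receipt(string):
--     lines = iter(string.split('\n'))
--     # advance to the opening asterisk line
--     line = next(lines)
--     while '*' not in line:
--         line = next(lines)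
--     # the opener and the line right after it are always part of the header
--     header = [line, next(lines)]
--     # copy lines up to and including the closing asterisk line
--     line = next(lines)
--     while '*' not in line:
--         header.append(line)
--         line = next(lines)
--     header.append(line)
--     return header
-- ===== Notes on version B (the rewrite author's own statement) =====
-- stated objective: alternative
-- what changed: Replaces A's index bookkeeping entirely (enumerate, two Option indices, a second split and a slice) by a streaming consumer of a line iterator: advance to the opening asterisk line, emit it and its successor, then copy lines until the closing asterisk line inclusive - the output is built directly, no indices or slicing exist in B.
import Mathlib
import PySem

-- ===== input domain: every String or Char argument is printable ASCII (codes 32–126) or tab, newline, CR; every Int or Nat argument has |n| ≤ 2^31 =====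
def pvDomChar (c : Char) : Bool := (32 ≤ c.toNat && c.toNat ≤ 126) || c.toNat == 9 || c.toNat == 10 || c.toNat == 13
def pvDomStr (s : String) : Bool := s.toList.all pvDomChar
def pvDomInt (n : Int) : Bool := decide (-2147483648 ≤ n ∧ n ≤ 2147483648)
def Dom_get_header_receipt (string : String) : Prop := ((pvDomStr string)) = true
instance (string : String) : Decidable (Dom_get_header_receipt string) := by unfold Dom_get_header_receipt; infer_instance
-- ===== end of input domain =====

-- B builds the header by consuming a line iterator (skip to the opening asterisk line,
-- emit it and its successor, copy until the closing asterisk line inclusive) instead of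
-- A's indexed scan + slice; where A raises (no header region) B raises too (outside Pre_).


-- ===== PORT A =====
-- string.split('\n'); the separator is non-empty, so split? is never none
def ghrLinesA (string : String) : List String := (PySem.Str.split? string "\n").getD []

-- A's for-loop over enumerate(string.split('\n')) with state (first_index, second_index);
-- 'break' returns the current state, 'continue' recurses with the state unchanged.
def ghrLoop : List (Int × String) → Option Int → Option Int → Option Int × Option Int
  | [], f, s => (f, s)
  | (index, line) :: rest, f, s =>
    if PySem.Str.isIn "*" line then
      match f with
      | none => ghrLoop rest (some index) s
      | some fi =>
        if index - 1 = fi then ghrLoop rest (some fi) s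
        else
          match s with
          | none => ghrLoop rest (some fi) (some index)
          | some si => (some fi, some si)          -- break
    else ghrLoop rest f s

def get_header_receipt (string : String) : List String :=
  match ghrLoop (PySem.List.enumerate (ghrLinesA string) 0) none none with
  | (some fi, some si) => PySem.List.slice (ghrLinesA string) (some fi) (some (si + 1))
  | (some _, none) => []                           -- Python raises TypeError here (outside Pre_)
  | (none, _) => []                                -- Python raises TypeError here (outside Pre_)

-- ===== PORT B =====
-- B's own lines = iter(string.split('\n'))
def ghrLinesB (string : String) : List String := (PySem.Str.split? string "\n").getD []

-- 'line = next(lines); while '*' not in line: line = next(lines)': the iterator positioned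
-- at the opening asterisk line; none = StopIteration (outside Pre_).
def ghrSkipToStar : List String → Option (List String)
  | [] => none
  | l :: rest => if PySem.Str.isIn "*" l then some (l :: rest) else ghrSkipToStar rest

-- the second while-loop: lines copied up to and including the next asterisk line;
-- none = StopIteration (outside Pre_).
def ghrTakeToStar : List String → Option (List String)
  | [] => none
  | l :: rest => if PySem.Str.isIn "*" l then some [l] else (ghrTakeToStar rest).map (l :: ·)

def get_header_receipt_alt (string : String) : List String :=
  match ghrSkipToStar (ghrLinesB string) with
  | some (l0 :: l1 :: rest2) =>                    -- header = [line, next(lines)]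
    match ghrTakeToStar rest2 with
    | some copied => l0 :: l1 :: copied
    | none => []                                   -- Python raises StopIteration (outside Pre_)
  | some [_] => []                                -- Python raises StopIteration (outside Pre_)
  | some [] => []
  | none => []                                     -- Python raises StopIteration (outside Pre_)

-- ===== PRECONDITION & SPEC =====
-- Pre_ excludes exactly the inputs on which A raises TypeError (None + 1 in the slice): there
-- must be an asterisk line and a second asterisk line at least two lines below some asterisk line.
def ghrLinesPre (string : String) : List String := (PySem.Str.split? string "\n").getD []

def Pre_get_header_receipt (string : String) : Prop :=
  ∃ i ∈ List.range (ghrLinesPre string).length, ∃ j ∈ List.range (ghrLinesPre string).length,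
    i + 2 ≤ j ∧ PySem.Str.isIn "*" ((ghrLinesPre string).getD i "") = true
      ∧ PySem.Str.isIn "*" ((ghrLinesPre string).getD j "") = true
instance (string : String) : Decidable (Pre_get_header_receipt string) := by unfold Pre_get_header_receipt; infer_instance

def pvWitness_get_header_receipt : String := "*a*\nx\n*b*"

def Spec_get_header_receipt (string : String) (out : List String) : Prop := out = get_header_receipt_alt string
instance (string : String) (out : List String) : Decidable (Spec_get_header_receipt string out) := by unfold Spec_get_header_receipt; infer_instance

-- ===== CLAIM (what is proved, stated in full; the proofs are below) =====
def Claim_equal_get_header_receipt : Prop := ∀ (string : String), Dom_get_header_receipt string → Pre_get_header_receipt string → Spec_get_header_receipt string (get_header_receipt string)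

-- ===== LEMMAS AND PROOFS =====

-- the asterisk indices of an enumerated line list
def ghrMarks (es : List (Int × String)) : List Int :=
  (es.filter (fun p => PySem.Str.isIn "*" p.2)).map (·.1)

-- the same indices as naturals, by direct recursion on the lines
def ghrStars : List String → List Nat
  | [] => []
  | l :: rest =>
    if PySem.Str.isIn "*" l then 0 :: (ghrStars rest).map (· + 1)
    else (ghrStars rest).map (· + 1)

-- A's selection step, parametrised by the star positions (proof-only helper)
def ghrSelect (ls : List String) : List Nat → List String
  | [] => []
  | f :: r =>
    match r.find? (fun j => decide (f + 2 ≤ j)) with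
    | none => []
    | some snd => (ls.drop f).take (snd + 1 - f)

-- B's assembly step after the opening line is found (proof-only helper)
def ghrAssemble : Option (List String) → List String
  | some (l0 :: l1 :: rest2) =>
    match ghrTakeToStar rest2 with
    | some copied => l0 :: l1 :: copied
    | none => []
  | some [_] => []
  | some [] => []
  | none => []

theorem ghrMarks_cons (i : Int) (l : String) (rest : List (Int × String)) :
    ghrMarks ((i, l) :: rest) =
      if PySem.Str.isIn "*" l = true then i :: ghrMarks rest else ghrMarks rest := by
  simp only [ghrMarks, List.filter_cons]
  by_cases h : PySem.Str.isIn "*" l = true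
  · rw [if_pos h, if_pos h, List.map_cons]
  · rw [if_neg h, if_neg h]

theorem ghrLoop_some_some (es : List (Int × String)) (fi si : Int) :
    ghrLoop es (some fi) (some si) = (some fi, some si) := by
  induction es with
  | nil => rfl
  | cons p rest ih =>
    obtain ⟨i, l⟩ := p
    simp only [ghrLoop]
    split_ifs with h1 h2 <;> simp [ih]

theorem ghrLoop_some_none (es : List (Int × String)) (fi : Int) :
    ghrLoop es (some fi) none = (some fi, (ghrMarks es).find? (fun i => !(i - 1 == fi))) := by
  induction es with
  | nil => rfl
  | cons p rest ih =>
    obtain ⟨i, l⟩ := p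
    rw [ghrMarks_cons]
    simp only [ghrLoop]
    by_cases hst : PySem.Str.isIn "*" l = true
    · rw [if_pos hst, if_pos hst]
      by_cases h1 : i - 1 = fi
      · rw [if_pos h1, List.find?_cons_of_neg (by simp [h1])]
        exact ih
      · rw [if_neg h1, List.find?_cons_of_pos (by simp [h1])]
        exact ghrLoop_some_some rest fi i
    · rw [if_neg hst, if_neg hst]
      exact ih

theorem ghrLoop_none_none (es : List (Int × String)) :
    ghrLoop es none none =
      match ghrMarks es with
      | [] => (none, none)
      | f :: r => (some f, r.find? (fun i => !(i - 1 == f))) := by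
  induction es with
  | nil => rfl
  | cons p rest ih =>
    obtain ⟨i, l⟩ := p
    rw [ghrMarks_cons]
    simp only [ghrLoop]
    by_cases hst : PySem.Str.isIn "*" l = true
    · rw [if_pos hst, if_pos hst]
      exact ghrLoop_some_none rest i
    · rw [if_neg hst, if_neg hst]
      exact ih

theorem ghrFind?_congr {α : Type} {p q : α → Bool} (l : List α) (h : ∀ a ∈ l, p a = q a) :
    l.find? p = l.find? q := by
  induction l with
  | nil => rfl
  | cons a t ih =>
    simp only [List.find?]
    rw [h a (by simp)]
    cases hq : q a
    · exact ih fun b hb => h b (by simp [hb])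
    · rfl

theorem ghrMarks_pairwise (lines : List String) :
    (ghrMarks (PySem.List.enumerate lines 0)).Pairwise (· < ·) := by
  have h := PySem.List.pairwise_lt_enumerate lines (s := 0)
  exact ((h.filter _).map _ (fun a b hab => hab))

-- the enumerated marks are the natural star positions shifted by the start index
theorem ghrMarks_enumerate (lines : List String) (s : Int) :
    ghrMarks (PySem.List.enumerate lines s)
      = (ghrStars lines).map (fun (n : Nat) => (n : Int) + s) := by
  induction lines generalizing s with
  | nil => rfl
  | cons l rest ih =>
    rw [PySem.List.enumerate_cons, ghrMarks_cons]
    simp only [ghrStars]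
    by_cases h : PySem.Str.isIn "*" l = true
    · rw [if_pos h, if_pos h, ih (s + 1), List.map_cons, List.map_map]
      congr 1
      · push_cast; ring
      · apply List.map_congr_left; intro n _; simp only [Function.comp]; push_cast; ring
    · rw [if_neg h, if_neg h, ih (s + 1), List.map_map]
      apply List.map_congr_left; intro n _; simp only [Function.comp]; push_cast; ring

-- ghrTakeToStar copies up to and including the first star line
theorem ghrTakeToStar_eq (ls : List String) :
    ghrTakeToStar ls = (ghrStars ls).head?.map (fun h => ls.take (h + 1)) := by
  induction ls with
  | nil => rfl
  | cons l rest ih =>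
    simp only [ghrTakeToStar, ghrStars]
    by_cases h : PySem.Str.isIn "*" l = true
    · rw [if_pos h, if_pos h]; rfl
    · rw [if_neg h, if_neg h, ih]
      cases hs : (ghrStars rest).head? <;> simp [hs, List.take_succ_cons]

theorem ghrFind_ge2 (S : List Nat) :
    (S.map (· + 2)).find? (fun j => decide (0 + 2 ≤ j)) = S.head?.map (· + 2) := by
  cases S with
  | nil => rfl
  | cons a t => rw [List.map_cons, List.find?_cons_of_pos (by simp)]; rfl

theorem ghrFind_shift (f : Nat) (r : List Nat) :
    (r.map (· + 1)).find? (fun j => decide (f + 1 + 2 ≤ j))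
      = (r.find? (fun j => decide (f + 2 ≤ j))).map (· + 1) := by
  rw [List.find?_map]
  congr 1
  apply ghrFind?_congr
  intro a _
  simp only [Function.comp]
  rcases Nat.lt_or_ge a (f + 2) with hlt | hge
  · have h1 : ¬(f + 1 + 2 ≤ a + 1) := by omega
    have h2 : ¬(f + 2 ≤ a) := by omega
    simp [h1, h2]
  · have h1 : f + 1 + 2 ≤ a + 1 := by omega
    simp [h1, hge]

-- A's selection over the star positions equals B's iterator pipeline
theorem ghrMain (ls : List String) :
    ghrSelect ls (ghrStars ls) = ghrAssemble (ghrSkipToStar ls) := by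
  induction ls with
  | nil => rfl
  | cons l rest ih =>
    simp only [ghrStars, ghrSkipToStar]
    by_cases h : PySem.Str.isIn "*" l = true
    · rw [if_pos h, if_pos h]
      cases rest with
      | nil => rfl
      | cons l1 rest2 =>
        have hfind : ((ghrStars (l1 :: rest2)).map (· + 1)).find? (fun j => decide (0 + 2 ≤ j))
            = ((ghrStars rest2).head?).map (· + 2) := by
          have hcomp : ((fun (x : Nat) => x + 1) ∘ (fun x => x + 1)) = (fun (x : Nat) => x + 2) := by
            funext n; simp [Function.comp]
          by_cases h1 : PySem.Str.isIn "*" l1 = true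
          · simp only [ghrStars, if_pos h1, List.map_cons, List.map_map, hcomp]
            rw [List.find?_cons_of_neg (by decide), ghrFind_ge2]
          · simp only [ghrStars, if_neg h1, List.map_map, hcomp]
            exact ghrFind_ge2 _
        simp only [ghrSelect]
        rw [hfind, ghrAssemble, ghrTakeToStar_eq]
        cases hs : (ghrStars rest2).head? with
        | none => rfl
        | some a =>
          simp only [Option.map_some, Nat.sub_zero, List.drop_zero]
          rw [List.take_succ_cons, List.take_succ_cons]
    · rw [if_neg h, if_neg h, ← ih]
      cases hs : ghrStars rest with
      | nil => rfl
      | cons f r =>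
        rw [List.map_cons]
        simp only [ghrSelect]
        rw [ghrFind_shift]
        cases hf : r.find? (fun j => decide (f + 2 ≤ j)) with
        | none => rfl
        | some snd =>
          have hsnd : f + 2 ≤ snd := by
            have := List.find?_some hf
            simpa using this
          simp only [Option.map_some]
          have h1 : snd + 1 + 1 - (f + 1) = snd + 1 - f := by omega
          rw [h1, List.drop_succ_cons]

-- A's result in the natural-index form
theorem ghrA_nat (string : String) :
    get_header_receipt string = ghrSelect (ghrLinesA string) (ghrStars (ghrLinesA string)) := by
  unfold get_header_receipt
  rw [ghrLoop_none_none]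
  have hpw := ghrMarks_pairwise (ghrLinesA string)
  rw [ghrMarks_enumerate _ 0] at *
  simp only [add_zero] at *
  cases hs : ghrStars (ghrLinesA string) with
  | nil => rfl
  | cons f r =>
    rw [hs] at hpw
    rw [List.map_cons] at hpw ⊢
    have hlt : ∀ a ∈ r, f < a := by
      intro a ha
      have := (List.pairwise_cons.mp hpw).1 ((a : Int)) (List.mem_map_of_mem ha)
      exact_mod_cast this
    have hfind : (r.map (fun (n : Nat) => (n : Int))).find? (fun i => !(i - 1 == (f : Int)))
        = (r.find? (fun j => decide (f + 2 ≤ j))).map (fun (n : Nat) => (n : Int)) := by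
      rw [List.find?_map]
      congr 1
      apply ghrFind?_congr
      intro a ha
      have haf := hlt a ha
      simp only [Function.comp]
      by_cases hcase : f + 2 ≤ a
      · have hne : ¬((a : Int) - 1 = (f : Int)) := by omega
        simp [hne, hcase]
      · have heq : (a : Int) - 1 = (f : Int) := by omega
        simp [heq, hcase]
    simp only [ghrSelect]
    rw [hfind]
    cases hf : r.find? (fun j => decide (f + 2 ≤ j)) with
    | none => rfl
    | some snd =>
      simp only [Option.map_some]
      have hcast : ((snd : Int) + 1) = ((snd + 1 : Nat) : Int) := by push_cast; ring
      rw [hcast, PySem.List.slice_natCast]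

theorem get_header_receipt_eq_alt (string : String) :
    get_header_receipt string = get_header_receipt_alt string := by
  rw [ghrA_nat, ghrMain]
  show ghrAssemble (ghrSkipToStar (ghrLinesA string)) = _
  rw [show ghrLinesA string = ghrLinesB string from rfl]
  rfl

-- ===== VERDICT (by name: the statement is the Claim_ definition above) =====
theorem get_header_receipt_spec : Claim_equal_get_header_receipt := by
  intro string _ _
  unfold Spec_get_header_receipt
  exact get_header_receipt_eq_alt string
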